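-- pv_equiv track=rewrite | github.com/Damblor/PCz | Semestr-6-IO/SrodowiskoProgramisty/lab7/z7.5.py | check_pesel
-- ===== SOURCE A (Python) =====
-- def check_pesel(p):
--
-- 	wagi = [1,3,7,9,1,3,7,9,1,3]
-- 	control = 0
--
-- 	if len(p) != 11:
-- 		return False
--
-- 	for i in range(10):
-- 		control += wagi[i] * int(p[i])
--
-- 	control = control % 10
-- 	if control != 0:
-- 		control = 10 - control
--
-- 	if int(p[10]) != control:
-- 		return False
--
-- 	return True
-- ===== SOURCE B (Python) =====
-- def check_pesel(p):
--     if len(p) != 11: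
--         return False
--     digits = [int(c) for c in p]
--     total = (sum(digits[0:10:4]) + digits[10]
--              + 3 * sum(digits[1:10:4])
--              + 7 * sum(digits[2:10:4])
--              + 9 * sum(digits[3:10:4]))
--     return total % 10 == 0
-- ===== Notes on version B (the rewrite author's own statement) =====
-- stated objective: alternative
-- what changed: B drops A's weight array, indexed loop and reconstruct-the-control-digit compare: it converts the string to digits once, groups the positions by weight class with strided slices (stride 4), multiplies each group sum by its weight once, adds the control digit, and tests divisibility of the total by 10.
import Mathlib
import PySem

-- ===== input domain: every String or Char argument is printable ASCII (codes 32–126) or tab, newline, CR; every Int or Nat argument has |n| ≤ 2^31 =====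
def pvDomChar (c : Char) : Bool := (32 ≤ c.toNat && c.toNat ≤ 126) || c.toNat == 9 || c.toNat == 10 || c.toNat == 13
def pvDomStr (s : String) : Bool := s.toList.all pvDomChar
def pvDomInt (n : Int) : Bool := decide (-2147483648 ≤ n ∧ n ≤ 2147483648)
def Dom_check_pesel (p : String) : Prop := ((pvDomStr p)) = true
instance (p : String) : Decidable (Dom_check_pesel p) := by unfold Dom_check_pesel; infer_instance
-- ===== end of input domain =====

-- B replaces A's weight-array loop and control-digit reconstruction by grouping the
-- digit positions into weight classes via strided slices and one divisibility test.


-- ===== PORT A =====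
-- int(p[i]) for one character, exact via PySem.Int.ofChars?; the .getD 0 default is never
-- reached under Pre_check_pesel (Python raises ValueError exactly where ofChars? is none).
def pyIntAt (p : String) (i : Int) : Int :=
  (PySem.Int.ofChars? [PySem.List.pyGetD p.toList i 'x']).getD 0

def check_pesel (p : String) : Bool :=
  let wagi : List Int := [1, 3, 7, 9, 1, 3, 7, 9, 1, 3]
  if PySem.Str.len p ≠ 11 then false
  else
    let control : Int :=
      (PySem.List.pyRange 0 10 1).foldl
        (fun c i => c + PySem.List.pyGetD wagi i 0 * pyIntAt p i) 0
    let control := PySem.Int.mod control 10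
    let control := if control ≠ 0 then 10 - control else control
    if pyIntAt p 10 ≠ control then false
    else true

-- ===== PORT B =====
-- int(c) for one character; as above the default is unreachable under Pre_check_pesel.
def pyIntOfChar (c : Char) : Int := (PySem.Int.ofChars? [c]).getD 0

def check_pesel_alt (p : String) : Bool :=
  if PySem.Str.len p ≠ 11 then false
  else
    let digits : List Int := p.toList.map pyIntOfChar
    let total : Int :=
      ((PySem.List.slice? digits (some 0) (some 10) 4).getD []).sum
      + PySem.List.pyGetD digits 10 0
      + 3 * ((PySem.List.slice? digits (some 1) (some 10) 4).getD []).sum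
      + 7 * ((PySem.List.slice? digits (some 2) (some 10) 4).getD []).sum
      + 9 * ((PySem.List.slice? digits (some 3) (some 10) 4).getD []).sum
    decide (PySem.Int.mod total 10 = 0)

-- ===== PRECONDITION & SPEC =====
-- Pre_ excludes exactly the inputs where Python A raises ValueError: an 11-character
-- string containing a non-decimal-digit character (int(p[i]) raises there; B raises identically).
def Pre_check_pesel (p : String) : Prop :=
  PySem.Str.len p ≠ 11 ∨ p.toList.all (fun c => c.isDigit) = true
instance (p : String) : Decidable (Pre_check_pesel p) := by unfold Pre_check_pesel; infer_instance
def pvWitness_check_pesel : String := "44051401359"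

def Spec_check_pesel (p : String) (out : Bool) : Prop := out = check_pesel_alt p
instance (p : String) (out : Bool) : Decidable (Spec_check_pesel p out) := by unfold Spec_check_pesel; infer_instance

-- ===== CLAIM (what is proved, stated in full; the proofs are below) =====
def Claim_equal_check_pesel : Prop := ∀ (p : String), Dom_check_pesel p → Pre_check_pesel p → Spec_check_pesel p (check_pesel p)

-- ===== LEMMAS AND PROOFS =====

-- int() of a single decimal-digit character is its digit value.
theorem ofChars?_digit (c : Char) (h : c.isDigit) :
    PySem.Int.ofChars? [c] = some ((c.toNat : Int) - 48) := by
  have h1 : 48 ≤ c.toNat ∧ c.toNat ≤ 57 := by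
    simp [Char.isDigit] at h
    exact ⟨h.1, h.2⟩
  have hc : c = '0' ∨ c = '1' ∨ c = '2' ∨ c = '3' ∨ c = '4' ∨ c = '5' ∨ c = '6' ∨ c = '7' ∨ c = '8' ∨ c = '9' := by
    have hv : c.val = '0'.val ∨ c.val = '1'.val ∨ c.val = '2'.val ∨ c.val = '3'.val ∨ c.val = '4'.val ∨
        c.val = '5'.val ∨ c.val = '6'.val ∨ c.val = '7'.val ∨ c.val = '8'.val ∨ c.val = '9'.val := by
      have := h1.1; have := h1.2
      unfold Char.toNat at *
      rcases c with ⟨v, _⟩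
      simp_all [UInt32.ext_iff]
      omega
    rcases hv with h|h|h|h|h|h|h|h|h|h <;> have := Char.ext h <;> tauto
  rcases hc with h|h|h|h|h|h|h|h|h|h <;> subst h <;> decide

-- evaluation of the strided slices on an 11-element list (elements symbolic)
theorem slice11_0 (a0 a1 a2 a3 a4 a5 a6 a7 a8 a9 a10 : Int) :
    PySem.List.slice? [a0,a1,a2,a3,a4,a5,a6,a7,a8,a9,a10] (some 0) (some 10) 4 = some [a0,a4,a8] := rfl
theorem slice11_1 (a0 a1 a2 a3 a4 a5 a6 a7 a8 a9 a10 : Int) :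
    PySem.List.slice? [a0,a1,a2,a3,a4,a5,a6,a7,a8,a9,a10] (some 1) (some 10) 4 = some [a1,a5,a9] := rfl
theorem slice11_2 (a0 a1 a2 a3 a4 a5 a6 a7 a8 a9 a10 : Int) :
    PySem.List.slice? [a0,a1,a2,a3,a4,a5,a6,a7,a8,a9,a10] (some 2) (some 10) 4 = some [a2,a6] := rfl
theorem slice11_3 (a0 a1 a2 a3 a4 a5 a6 a7 a8 a9 a10 : Int) :
    PySem.List.slice? [a0,a1,a2,a3,a4,a5,a6,a7,a8,a9,a10] (some 3) (some 10) 4 = some [a3,a7] := rfl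
theorem getD11_10 (a0 a1 a2 a3 a4 a5 a6 a7 a8 a9 a10 : Int) :
    PySem.List.pyGetD [a0,a1,a2,a3,a4,a5,a6,a7,a8,a9,a10] 10 0 = a10 := rfl

-- ===== VERDICT (by name: the statement is the Claim_ definition above) =====
theorem check_pesel_spec : Claim_equal_check_pesel := by
  intro p _ hpre
  unfold Spec_check_pesel check_pesel check_pesel_alt
  by_cases h11 : PySem.Str.len p = 11
  · have hd : p.toList.all (fun c => c.isDigit) = true := by
      rcases hpre with h | h
      · exact absurd h11 h
      · exact h
    simp only [h11, ne_eq, not_true_eq_false, if_false, pyIntAt]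
    rw [PySem.Str.len_eq] at h11
    have hl : p.toList.length = 11 := by exact_mod_cast h11
    revert hd hl
    generalize p.toList = L
    intro hd hl
    rcases L with _|⟨c0,_|⟨c1,_|⟨c2,_|⟨c3,_|⟨c4,_|⟨c5,_|⟨c6,_|⟨c7,_|⟨c8,_|⟨c9,_|⟨c10,_|⟨c11,t⟩⟩⟩⟩⟩⟩⟩⟩⟩⟩⟩⟩ <;>
      simp only [List.length] at hl <;> try omega
    simp only [List.all_cons, List.all_nil, Bool.and_eq_true, and_true] at hd
    obtain ⟨d0,d1,d2,d3,d4,d5,d6,d7,d8,d9,d10⟩ := hd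
    have e0 := ofChars?_digit _ d0
    have e1 := ofChars?_digit _ d1
    have e2 := ofChars?_digit _ d2
    have e3 := ofChars?_digit _ d3
    have e4 := ofChars?_digit _ d4
    have e5 := ofChars?_digit _ d5
    have e6 := ofChars?_digit _ d6
    have e7 := ofChars?_digit _ d7
    have e8 := ofChars?_digit _ d8
    have e9 := ofChars?_digit _ d9
    have e10 := ofChars?_digit _ d10
    have hb : ∀ c : Char, c.isDigit → (48:Int) ≤ (c.toNat : Int) ∧ ((c.toNat : Int)) ≤ 57 := by
      intro c h
      simp [Char.isDigit] at h
      exact ⟨by exact_mod_cast h.1, by exact_mod_cast h.2⟩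
    have b0 := hb _ d0; have b1 := hb _ d1; have b2 := hb _ d2; have b3 := hb _ d3
    have b4 := hb _ d4; have b5 := hb _ d5; have b6 := hb _ d6; have b7 := hb _ d7
    have b8 := hb _ d8; have b9 := hb _ d9; have b10 := hb _ d10
    simp only [show PySem.List.pyRange 0 10 1 = [0,1,2,3,4,5,6,7,8,9] from by decide,
      List.foldl, List.map, pyIntOfChar,
      e0,e1,e2,e3,e4,e5,e6,e7,e8,e9,e10, Option.getD_some,
      slice11_0, slice11_1, slice11_2, slice11_3, getD11_10, List.sum_cons, List.sum_nil]
    simp [PySem.List.pyGetD, PySem.List.pyGet?, PySem.List.pyIdx?, PySem.Int.mod, Int.fmod_eq_emod,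
      e0,e1,e2,e3,e4,e5,e6,e7,e8,e9,e10]
    generalize ((c0.toNat : Int)) = n0 at *
    generalize ((c1.toNat : Int)) = n1 at *
    generalize ((c2.toNat : Int)) = n2 at *
    generalize ((c3.toNat : Int)) = n3 at *
    generalize ((c4.toNat : Int)) = n4 at *
    generalize ((c5.toNat : Int)) = n5 at *
    generalize ((c6.toNat : Int)) = n6 at *
    generalize ((c7.toNat : Int)) = n7 at *
    generalize ((c8.toNat : Int)) = n8 at *
    generalize ((c9.toNat : Int)) = n9 at *
    generalize ((c10.toNat : Int)) = n10 at *
    split_ifs with h1 <;> simp_all <;> omega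
  · split_ifs with h
    · rfl
    · exact absurd h11 h
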